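-- pv_equiv track=rewrite | github.com/riniydra/Hackathon-Project | apps/api/app/nlp_utils.py | classify_abuse
-- ===== SOURCE A (Python) =====
-- def classify_abuse(text: str) -> str:
--     """Classify type of abuse mentioned in text"""
--     labels, t = [], text.lower()
--     if any(k in t for k in ["hit", "slap", "choke", "punch", "strangle"]):
--         labels.append("physical")
--     if any(k in t for k in ["insult", "gaslight", "control", "isolate"]):
--         labels.append("emotional")
--     if any(k in t for k in ["took my money", "paycheck", "bank", "card"]):
--         labels.append("financial")
--     if any(k in t for k in ["tracker", "spy app", "keylogger", "icloud", "gps"]):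
--         labels.append("digital_surveillance")
--     if any(k in t for k in ["followed me", "waiting outside", "shows up", "tailing"]):
--         labels.append("stalking")
--     if any(k in t for k in ["forced", "sexual", "assault", "rape"]):
--         labels.append("sexual")
--     return ",".join(sorted(set(labels))) or "unknown"
-- ===== SOURCE B (Python) =====
-- # Single left-to-right scan over the lowered text: at each position, every
-- # keyword that starts there contributes its label via a flat keyword->label
-- # pair list (naive multi-pattern matcher), instead of A's per-category
-- # substring searches; same sorted/dedup/"unknown" tail.
-- _PAIRS = [
--     ("hit", "physical"), ("slap", "physical"), ("choke", "physical"),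
--     ("punch", "physical"), ("strangle", "physical"),
--     ("insult", "emotional"), ("gaslight", "emotional"),
--     ("control", "emotional"), ("isolate", "emotional"),
--     ("took my money", "financial"), ("paycheck", "financial"),
--     ("bank", "financial"), ("card", "financial"),
--     ("tracker", "digital_surveillance"), ("spy app", "digital_surveillance"),
--     ("keylogger", "digital_surveillance"), ("icloud", "digital_surveillance"),
--     ("gps", "digital_surveillance"),
--     ("followed me", "stalking"), ("waiting outside", "stalking"),
--     ("shows up", "stalking"), ("tailing", "stalking"),
--     ("forced", "sexual"), ("sexual", "sexual"),
--     ("assault", "sexual"), ("rape", "sexual"),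
-- ]
--
--
-- def classify_abuse(text: str) -> str:
--     t = text.lower()
--     found = {lab for i in range(len(t))
--              for kw, lab in _PAIRS if t.startswith(kw, i)}
--     return ",".join(sorted(found)) or "unknown"
-- ===== Notes on version B (the rewrite author's own statement) =====
-- stated objective: alternative
-- what changed: Replaces A's six per-category any(k in t) substring searches with a single left-to-right scan over positions of the lowered text that matches a flat keyword->label pair table at each position (naive multi-pattern matcher), collecting labels in a set; the sorted/join/'unknown' tail is kept.
import Mathlib
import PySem

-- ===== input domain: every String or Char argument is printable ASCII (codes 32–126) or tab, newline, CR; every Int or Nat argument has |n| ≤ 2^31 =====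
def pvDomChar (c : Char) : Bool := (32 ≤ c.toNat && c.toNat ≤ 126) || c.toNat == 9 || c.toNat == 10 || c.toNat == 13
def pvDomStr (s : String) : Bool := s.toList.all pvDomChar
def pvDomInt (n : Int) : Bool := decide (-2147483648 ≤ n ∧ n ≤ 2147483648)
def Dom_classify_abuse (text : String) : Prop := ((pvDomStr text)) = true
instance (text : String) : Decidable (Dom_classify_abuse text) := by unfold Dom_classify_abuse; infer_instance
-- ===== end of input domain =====

-- B replaces A's six per-category substring searches with a single positional
-- scan of the lowered text against a flat keyword->label pair table (objective: alternative).

-- ===== PORT A =====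
-- labels list built by A's six conditional appends (A's body up to the join)
def pvLabelsA (t : String) : List String :=
  let labels : List String := []
  let labels := if ["hit", "slap", "choke", "punch", "strangle"].any
      (fun k => PySem.Str.isIn k t) then labels ++ ["physical"] else labels
  let labels := if ["insult", "gaslight", "control", "isolate"].any
      (fun k => PySem.Str.isIn k t) then labels ++ ["emotional"] else labels
  let labels := if ["took my money", "paycheck", "bank", "card"].any
      (fun k => PySem.Str.isIn k t) then labels ++ ["financial"] else labels
  let labels := if ["tracker", "spy app", "keylogger", "icloud", "gps"].any
      (fun k => PySem.Str.isIn k t) then labels ++ ["digital_surveillance"] else labels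
  let labels := if ["followed me", "waiting outside", "shows up", "tailing"].any
      (fun k => PySem.Str.isIn k t) then labels ++ ["stalking"] else labels
  let labels := if ["forced", "sexual", "assault", "rape"].any
      (fun k => PySem.Str.isIn k t) then labels ++ ["sexual"] else labels
  labels

def classify_abuse (text : String) : String :=
  let t := PySem.Str.lower text
  let joined := PySem.Str.join ","
    (PySem.List.sorted (PySem.Set.ofList (pvLabelsA t)) (fun x => x) false)
  if joined = "" then "unknown" else joined

-- ===== PORT B =====
-- the flat keyword -> label table (_PAIRS in Source B), keywords as code-point lists
def pvPairs : List (List Char × String) :=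
  [("hit".toList, "physical"), ("slap".toList, "physical"), ("choke".toList, "physical"),
   ("punch".toList, "physical"), ("strangle".toList, "physical"),
   ("insult".toList, "emotional"), ("gaslight".toList, "emotional"),
   ("control".toList, "emotional"), ("isolate".toList, "emotional"),
   ("took my money".toList, "financial"), ("paycheck".toList, "financial"),
   ("bank".toList, "financial"), ("card".toList, "financial"),
   ("tracker".toList, "digital_surveillance"), ("spy app".toList, "digital_surveillance"),
   ("keylogger".toList, "digital_surveillance"), ("icloud".toList, "digital_surveillance"),
   ("gps".toList, "digital_surveillance"),
   ("followed me".toList, "stalking"), ("waiting outside".toList, "stalking"),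
   ("shows up".toList, "stalking"), ("tailing".toList, "stalking"),
   ("forced".toList, "sexual"), ("sexual".toList, "sexual"),
   ("assault".toList, "sexual"), ("rape".toList, "sexual")]

-- the set comprehension's underlying element stream (positions outer, pairs inner);
-- t.startswith(kw, i) is ported as startswith on (t.drop i) — exact since range gives 0 ≤ i ≤ len(t)
def pvHitsB (t : List Char) : List String :=
  (PySem.List.pyRange 0 (t.length : Int) 1).flatMap (fun i =>
    (pvPairs.filter (fun p => PySem.Chars.startswith (t.drop i.toNat) p.1)).map Prod.snd)

def classify_abuse_alt (text : String) : String :=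
  let t := (PySem.Str.lower text).toList
  let found : PySem.Set String := PySem.Set.ofList (pvHitsB t)
  let joined := PySem.Str.join "," (PySem.List.sorted found (fun x => x) false)
  if joined = "" then "unknown" else joined

-- ===== PRECONDITION & SPEC =====
def Spec_classify_abuse (text : String) (out : String) : Prop := out = classify_abuse_alt text
instance (text : String) (out : String) : Decidable (Spec_classify_abuse text out) := by unfold Spec_classify_abuse; infer_instance

-- ===== CLAIM (what is proved, stated in full; the proofs are below) =====
def Claim_equal_classify_abuse : Prop := ∀ (text : String), Dom_classify_abuse text → Spec_classify_abuse text (classify_abuse text)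

-- ===== LEMMAS AND PROOFS =====

-- a nonempty pattern occurs at some scanned position of s iff it is a substring of s
theorem pv_posEx (kw s : List Char) (hkw : kw ≠ []) :
    (∃ i ∈ PySem.List.pyRange 0 (s.length : Int) 1,
      PySem.Chars.startswith (s.drop i.toNat) kw = true) ↔ PySem.Chars.isIn kw s = true := by
  rw [← PySem.Chars.exists_prefix_drop_iff_isIn]
  constructor
  · rintro ⟨i, _, hsw⟩
    exact ⟨i.toNat, (PySem.Chars.startswith_iff _ _).1 hsw⟩
  · rintro ⟨j, hj⟩
    have hjlt : j < s.length := by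
      by_contra h
      push Not at h
      rw [List.drop_eq_nil_of_le h] at hj
      exact hkw (List.prefix_nil.mp hj)
    refine ⟨(j : Int), (PySem.List.mem_pyRange_one).2 ⟨by positivity, by exact_mod_cast hjlt⟩,
      (PySem.Chars.startswith_iff _ _).2 (by simpa using hj)⟩

-- the same membership condition, written out as six label groups
def pvCond (t : List Char) (x : String) : Prop :=
  ((PySem.Chars.isIn "hit".toList t = true ∨ PySem.Chars.isIn "slap".toList t = true ∨
    PySem.Chars.isIn "choke".toList t = true ∨ PySem.Chars.isIn "punch".toList t = true ∨
    PySem.Chars.isIn "strangle".toList t = true) ∧ x = "physical") ∨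
  ((PySem.Chars.isIn "insult".toList t = true ∨ PySem.Chars.isIn "gaslight".toList t = true ∨
    PySem.Chars.isIn "control".toList t = true ∨ PySem.Chars.isIn "isolate".toList t = true) ∧ x = "emotional") ∨
  ((PySem.Chars.isIn "took my money".toList t = true ∨ PySem.Chars.isIn "paycheck".toList t = true ∨
    PySem.Chars.isIn "bank".toList t = true ∨ PySem.Chars.isIn "card".toList t = true) ∧ x = "financial") ∨
  ((PySem.Chars.isIn "tracker".toList t = true ∨ PySem.Chars.isIn "spy app".toList t = true ∨
    PySem.Chars.isIn "keylogger".toList t = true ∨ PySem.Chars.isIn "icloud".toList t = true ∨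
    PySem.Chars.isIn "gps".toList t = true) ∧ x = "digital_surveillance") ∨
  ((PySem.Chars.isIn "followed me".toList t = true ∨ PySem.Chars.isIn "waiting outside".toList t = true ∨
    PySem.Chars.isIn "shows up".toList t = true ∨ PySem.Chars.isIn "tailing".toList t = true) ∧ x = "stalking") ∨
  ((PySem.Chars.isIn "forced".toList t = true ∨ PySem.Chars.isIn "sexual".toList t = true ∨
    PySem.Chars.isIn "assault".toList t = true ∨ PySem.Chars.isIn "rape".toList t = true) ∧ x = "sexual")

theorem pv_pairsCond (t : List Char) (x : String) :
    (∃ p ∈ pvPairs, PySem.Chars.isIn p.1 t = true ∧ x = p.2) ↔ pvCond t x := by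
  unfold pvCond
  simp only [pvPairs, List.exists_mem_cons_iff, List.not_mem_nil, false_and,
    exists_false, or_false]
  constructor
  · rintro (⟨h, rfl⟩|⟨h, rfl⟩|⟨h, rfl⟩|⟨h, rfl⟩|⟨h, rfl⟩|⟨h, rfl⟩|⟨h, rfl⟩|⟨h, rfl⟩|⟨h, rfl⟩|⟨h, rfl⟩|⟨h, rfl⟩|⟨h, rfl⟩|⟨h, rfl⟩|⟨h, rfl⟩|⟨h, rfl⟩|⟨h, rfl⟩|⟨h, rfl⟩|⟨h, rfl⟩|⟨h, rfl⟩|⟨h, rfl⟩|⟨h, rfl⟩|⟨h, rfl⟩|⟨h, rfl⟩|⟨h, rfl⟩|⟨h, rfl⟩|⟨h, rfl⟩)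
    · exact Or.inl (⟨Or.inl (h), rfl⟩)
    · exact Or.inl (⟨Or.inr (Or.inl (h)), rfl⟩)
    · exact Or.inl (⟨Or.inr (Or.inr (Or.inl (h))), rfl⟩)
    · exact Or.inl (⟨Or.inr (Or.inr (Or.inr (Or.inl (h)))), rfl⟩)
    · exact Or.inl (⟨Or.inr (Or.inr (Or.inr (Or.inr (h)))), rfl⟩)
    · exact Or.inr (Or.inl (⟨Or.inl (h), rfl⟩))
    · exact Or.inr (Or.inl (⟨Or.inr (Or.inl (h)), rfl⟩))
    · exact Or.inr (Or.inl (⟨Or.inr (Or.inr (Or.inl (h))), rfl⟩))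
    · exact Or.inr (Or.inl (⟨Or.inr (Or.inr (Or.inr (h))), rfl⟩))
    · exact Or.inr (Or.inr (Or.inl (⟨Or.inl (h), rfl⟩)))
    · exact Or.inr (Or.inr (Or.inl (⟨Or.inr (Or.inl (h)), rfl⟩)))
    · exact Or.inr (Or.inr (Or.inl (⟨Or.inr (Or.inr (Or.inl (h))), rfl⟩)))
    · exact Or.inr (Or.inr (Or.inl (⟨Or.inr (Or.inr (Or.inr (h))), rfl⟩)))
    · exact Or.inr (Or.inr (Or.inr (Or.inl (⟨Or.inl (h), rfl⟩))))
    · exact Or.inr (Or.inr (Or.inr (Or.inl (⟨Or.inr (Or.inl (h)), rfl⟩))))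
    · exact Or.inr (Or.inr (Or.inr (Or.inl (⟨Or.inr (Or.inr (Or.inl (h))), rfl⟩))))
    · exact Or.inr (Or.inr (Or.inr (Or.inl (⟨Or.inr (Or.inr (Or.inr (Or.inl (h)))), rfl⟩))))
    · exact Or.inr (Or.inr (Or.inr (Or.inl (⟨Or.inr (Or.inr (Or.inr (Or.inr (h)))), rfl⟩))))
    · exact Or.inr (Or.inr (Or.inr (Or.inr (Or.inl (⟨Or.inl (h), rfl⟩)))))
    · exact Or.inr (Or.inr (Or.inr (Or.inr (Or.inl (⟨Or.inr (Or.inl (h)), rfl⟩)))))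
    · exact Or.inr (Or.inr (Or.inr (Or.inr (Or.inl (⟨Or.inr (Or.inr (Or.inl (h))), rfl⟩)))))
    · exact Or.inr (Or.inr (Or.inr (Or.inr (Or.inl (⟨Or.inr (Or.inr (Or.inr (h))), rfl⟩)))))
    · exact Or.inr (Or.inr (Or.inr (Or.inr (Or.inr (⟨Or.inl (h), rfl⟩)))))
    · exact Or.inr (Or.inr (Or.inr (Or.inr (Or.inr (⟨Or.inr (Or.inl (h)), rfl⟩)))))
    · exact Or.inr (Or.inr (Or.inr (Or.inr (Or.inr (⟨Or.inr (Or.inr (Or.inl (h))), rfl⟩)))))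
    · exact Or.inr (Or.inr (Or.inr (Or.inr (Or.inr (⟨Or.inr (Or.inr (Or.inr (h))), rfl⟩)))))
  · rintro (⟨(h|h|h|h|h), rfl⟩ | ⟨(h|h|h|h), rfl⟩ | ⟨(h|h|h|h), rfl⟩ | ⟨(h|h|h|h|h), rfl⟩ | ⟨(h|h|h|h), rfl⟩ | ⟨(h|h|h|h), rfl⟩)
    · exact Or.inl (⟨h, rfl⟩)
    · exact Or.inr (Or.inl (⟨h, rfl⟩))
    · exact Or.inr (Or.inr (Or.inl (⟨h, rfl⟩)))
    · exact Or.inr (Or.inr (Or.inr (Or.inl (⟨h, rfl⟩))))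
    · exact Or.inr (Or.inr (Or.inr (Or.inr (Or.inl (⟨h, rfl⟩)))))
    · exact Or.inr (Or.inr (Or.inr (Or.inr (Or.inr (Or.inl (⟨h, rfl⟩))))))
    · exact Or.inr (Or.inr (Or.inr (Or.inr (Or.inr (Or.inr (Or.inl (⟨h, rfl⟩)))))))
    · exact Or.inr (Or.inr (Or.inr (Or.inr (Or.inr (Or.inr (Or.inr (Or.inl (⟨h, rfl⟩))))))))
    · exact Or.inr (Or.inr (Or.inr (Or.inr (Or.inr (Or.inr (Or.inr (Or.inr (Or.inl (⟨h, rfl⟩)))))))))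
    · exact Or.inr (Or.inr (Or.inr (Or.inr (Or.inr (Or.inr (Or.inr (Or.inr (Or.inr (Or.inl (⟨h, rfl⟩))))))))))
    · exact Or.inr (Or.inr (Or.inr (Or.inr (Or.inr (Or.inr (Or.inr (Or.inr (Or.inr (Or.inr (Or.inl (⟨h, rfl⟩)))))))))))
    · exact Or.inr (Or.inr (Or.inr (Or.inr (Or.inr (Or.inr (Or.inr (Or.inr (Or.inr (Or.inr (Or.inr (Or.inl (⟨h, rfl⟩))))))))))))
    · exact Or.inr (Or.inr (Or.inr (Or.inr (Or.inr (Or.inr (Or.inr (Or.inr (Or.inr (Or.inr (Or.inr (Or.inr (Or.inl (⟨h, rfl⟩)))))))))))))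
    · exact Or.inr (Or.inr (Or.inr (Or.inr (Or.inr (Or.inr (Or.inr (Or.inr (Or.inr (Or.inr (Or.inr (Or.inr (Or.inr (Or.inl (⟨h, rfl⟩))))))))))))))
    · exact Or.inr (Or.inr (Or.inr (Or.inr (Or.inr (Or.inr (Or.inr (Or.inr (Or.inr (Or.inr (Or.inr (Or.inr (Or.inr (Or.inr (Or.inl (⟨h, rfl⟩)))))))))))))))
    · exact Or.inr (Or.inr (Or.inr (Or.inr (Or.inr (Or.inr (Or.inr (Or.inr (Or.inr (Or.inr (Or.inr (Or.inr (Or.inr (Or.inr (Or.inr (Or.inl (⟨h, rfl⟩))))))))))))))))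
    · exact Or.inr (Or.inr (Or.inr (Or.inr (Or.inr (Or.inr (Or.inr (Or.inr (Or.inr (Or.inr (Or.inr (Or.inr (Or.inr (Or.inr (Or.inr (Or.inr (Or.inl (⟨h, rfl⟩)))))))))))))))))
    · exact Or.inr (Or.inr (Or.inr (Or.inr (Or.inr (Or.inr (Or.inr (Or.inr (Or.inr (Or.inr (Or.inr (Or.inr (Or.inr (Or.inr (Or.inr (Or.inr (Or.inr (Or.inl (⟨h, rfl⟩))))))))))))))))))
    · exact Or.inr (Or.inr (Or.inr (Or.inr (Or.inr (Or.inr (Or.inr (Or.inr (Or.inr (Or.inr (Or.inr (Or.inr (Or.inr (Or.inr (Or.inr (Or.inr (Or.inr (Or.inr (Or.inl (⟨h, rfl⟩)))))))))))))))))))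
    · exact Or.inr (Or.inr (Or.inr (Or.inr (Or.inr (Or.inr (Or.inr (Or.inr (Or.inr (Or.inr (Or.inr (Or.inr (Or.inr (Or.inr (Or.inr (Or.inr (Or.inr (Or.inr (Or.inr (Or.inl (⟨h, rfl⟩))))))))))))))))))))
    · exact Or.inr (Or.inr (Or.inr (Or.inr (Or.inr (Or.inr (Or.inr (Or.inr (Or.inr (Or.inr (Or.inr (Or.inr (Or.inr (Or.inr (Or.inr (Or.inr (Or.inr (Or.inr (Or.inr (Or.inr (Or.inl (⟨h, rfl⟩)))))))))))))))))))))
    · exact Or.inr (Or.inr (Or.inr (Or.inr (Or.inr (Or.inr (Or.inr (Or.inr (Or.inr (Or.inr (Or.inr (Or.inr (Or.inr (Or.inr (Or.inr (Or.inr (Or.inr (Or.inr (Or.inr (Or.inr (Or.inr (Or.inl (⟨h, rfl⟩))))))))))))))))))))))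
    · exact Or.inr (Or.inr (Or.inr (Or.inr (Or.inr (Or.inr (Or.inr (Or.inr (Or.inr (Or.inr (Or.inr (Or.inr (Or.inr (Or.inr (Or.inr (Or.inr (Or.inr (Or.inr (Or.inr (Or.inr (Or.inr (Or.inr (Or.inl (⟨h, rfl⟩)))))))))))))))))))))))
    · exact Or.inr (Or.inr (Or.inr (Or.inr (Or.inr (Or.inr (Or.inr (Or.inr (Or.inr (Or.inr (Or.inr (Or.inr (Or.inr (Or.inr (Or.inr (Or.inr (Or.inr (Or.inr (Or.inr (Or.inr (Or.inr (Or.inr (Or.inr (Or.inl (⟨h, rfl⟩))))))))))))))))))))))))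
    · exact Or.inr (Or.inr (Or.inr (Or.inr (Or.inr (Or.inr (Or.inr (Or.inr (Or.inr (Or.inr (Or.inr (Or.inr (Or.inr (Or.inr (Or.inr (Or.inr (Or.inr (Or.inr (Or.inr (Or.inr (Or.inr (Or.inr (Or.inr (Or.inr (Or.inl (⟨h, rfl⟩)))))))))))))))))))))))))
    · exact Or.inr (Or.inr (Or.inr (Or.inr (Or.inr (Or.inr (Or.inr (Or.inr (Or.inr (Or.inr (Or.inr (Or.inr (Or.inr (Or.inr (Or.inr (Or.inr (Or.inr (Or.inr (Or.inr (Or.inr (Or.inr (Or.inr (Or.inr (Or.inr (Or.inr (⟨h, rfl⟩)))))))))))))))))))))))))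

theorem pv_memB (t : List Char) (x : String) :
    x ∈ pvHitsB t ↔ ∃ p ∈ pvPairs, PySem.Chars.isIn p.1 t = true ∧ x = p.2 := by
  have hne : ∀ p ∈ pvPairs, p.1 ≠ [] := by decide
  unfold pvHitsB
  simp only [List.mem_flatMap, List.mem_map, List.mem_filter]
  constructor
  · rintro ⟨i, hi, p, ⟨hp, hsw⟩, hx⟩
    exact ⟨p, hp, (pv_posEx p.1 t (hne p hp)).1 ⟨i, hi, hsw⟩, hx.symm⟩
  · rintro ⟨p, hp, hin, hx⟩
    obtain ⟨i, hi, hsw⟩ := (pv_posEx p.1 t (hne p hp)).2 hin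
    exact ⟨i, hi, p, ⟨hp, hsw⟩, hx.symm⟩

set_option maxHeartbeats 1600000 in
theorem pv_memA (t : String) (x : String) :
    x ∈ pvLabelsA t ↔ pvCond t.toList x := by
  unfold pvLabelsA pvCond
  simp only [List.any_eq_true, List.mem_cons, List.not_mem_nil, or_false,
    PySem.Str.isIn_eq]
  split_ifs <;> simp_all

theorem pv_hits_perm (t : String) :
    (PySem.Set.ofList (pvLabelsA t)).Perm (PySem.Set.ofList (pvHitsB t.toList)) := by
  refine (List.perm_ext_iff_of_nodup (PySem.Set.nodup_ofList _) (PySem.Set.nodup_ofList _)).2 ?_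
  intro x
  rw [PySem.Set.mem_ofList, PySem.Set.mem_ofList, pv_memA, pv_memB, pv_pairsCond]

-- ===== VERDICT (by name: the statement is the Claim_ definition above) =====
theorem classify_abuse_spec : Claim_equal_classify_abuse := by
  intro text _
  unfold Spec_classify_abuse classify_abuse classify_abuse_alt
  have h := (PySem.List.sorted_id_eq_sorted_id_iff_perm _ _).2 (pv_hits_perm (PySem.Str.lower text))
  simp only [h]
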